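-- pv_equiv track=rewrite | github.com/sairohitp/problem-solving | CodeChef/snapchat/snapchat.py | max_streak_count
-- ===== SOURCE A (Python) =====
-- def max_streak_count(n, chef_snaps, chefina_snaps):
--     streak_count = 0
--     max_streak_count = 0
--     for i in range(n):
--         if chef_snaps[i] > 0 and chefina_snaps[i] > 0:
--             streak_count += 1
--         else:
--             streak_count = 0
--         max_streak_count = max(max_streak_count, streak_count)
--     return max_streak_count
-- ===== SOURCE B (Python) =====
-- def max_streak_count(n, chef_snaps, chefina_snaps):
--     ok = [chef_snaps[i] > 0 and chefina_snaps[i] > 0 for i in range(n)]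
--     breaks = [-1] + [i for i, b in enumerate(ok) if not b] + [len(ok)]
--     return max(b2 - b1 - 1 for b1, b2 in zip(breaks, breaks[1:]))
-- ===== Notes on version B (the rewrite author's own statement) =====
-- stated objective: alternative
-- what changed: Replaces the online reset-counter scan with a precompute-then-measure shape: build the boolean table, collect the positions of the failed days plus two sentinels, and return the maximum gap between consecutive failure positions.
import Mathlib
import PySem

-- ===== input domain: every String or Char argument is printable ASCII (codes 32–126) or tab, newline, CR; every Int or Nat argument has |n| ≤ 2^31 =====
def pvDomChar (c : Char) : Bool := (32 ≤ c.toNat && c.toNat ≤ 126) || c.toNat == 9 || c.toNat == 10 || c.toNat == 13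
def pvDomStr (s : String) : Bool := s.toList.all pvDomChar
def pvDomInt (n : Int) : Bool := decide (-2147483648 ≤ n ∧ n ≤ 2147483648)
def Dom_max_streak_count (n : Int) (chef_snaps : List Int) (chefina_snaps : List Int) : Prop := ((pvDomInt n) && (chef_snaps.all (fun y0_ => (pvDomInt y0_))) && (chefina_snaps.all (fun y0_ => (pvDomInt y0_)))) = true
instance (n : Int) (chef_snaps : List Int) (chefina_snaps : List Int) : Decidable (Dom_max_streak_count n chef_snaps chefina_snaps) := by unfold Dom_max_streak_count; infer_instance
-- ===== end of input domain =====

-- B replaces A's online reset-counter with a different decomposition: tabulate the good days,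
-- list the failure positions with sentinels, and take the maximum gap between consecutive failures.

-- ===== PORT A =====
def max_streak_count (n : Int) (chef_snaps : List Int) (chefina_snaps : List Int) : Int :=
  ((PySem.List.pyRange 0 n 1).foldl
    (fun (st : Int × Int) i =>
      let streak : Int :=
        if PySem.List.pyGetD chef_snaps i 0 > 0 ∧ PySem.List.pyGetD chefina_snaps i 0 > 0
        then st.1 + 1 else 0
      (streak, max st.2 streak))
    (0, 0)).2

-- ===== PORT B =====
def max_streak_count_alt (n : Int) (chef_snaps : List Int) (chefina_snaps : List Int) : Int :=
  let ok : List Bool := (PySem.List.pyRange 0 n 1).map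
    (fun i => decide (PySem.List.pyGetD chef_snaps i 0 > 0 ∧ PySem.List.pyGetD chefina_snaps i 0 > 0))
  let breaks : List Int :=
    [-1] ++ ((PySem.List.enumerate ok 0).filter (fun p => !p.2)).map (fun p => p.1) ++ [(ok.length : Int)]
  let gaps : List Int := (breaks.zip (PySem.List.slice breaks (some 1) none)).map (fun p => p.2 - p.1 - 1)
  -- Python's max(...) over the gaps generator; the generator is never empty (breaks has ≥ 2 entries),
  -- so the none branch is unreachable
  match PySem.List.max? gaps (fun y => y) with
  | some v => v
  | none => 0

-- ===== PRECONDITION & SPEC =====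
-- Pre_ excludes exactly the inputs where Python A raises IndexError: n exceeding a list's length.
def Pre_max_streak_count (n : Int) (chef_snaps : List Int) (chefina_snaps : List Int) : Prop :=
  n ≤ (chef_snaps.length : Int) ∧ n ≤ (chefina_snaps.length : Int)
instance (n : Int) (chef_snaps : List Int) (chefina_snaps : List Int) : Decidable (Pre_max_streak_count n chef_snaps chefina_snaps) := by unfold Pre_max_streak_count; infer_instance

def pvWitness_max_streak_count : Int × List Int × List Int := (3, [1, 0, 2], [2, 5, 1])

def Spec_max_streak_count (n : Int) (chef_snaps : List Int) (chefina_snaps : List Int) (out : Int) : Prop := out = max_streak_count_alt n chef_snaps chefina_snaps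
instance (n : Int) (chef_snaps : List Int) (chefina_snaps : List Int) (out : Int) : Decidable (Spec_max_streak_count n chef_snaps chefina_snaps out) := by unfold Spec_max_streak_count; infer_instance

-- ===== CLAIM (what is proved, stated in full; the proofs are below) =====
def Claim_equal_max_streak_count : Prop := ∀ (n : Int) (chef_snaps : List Int) (chefina_snaps : List Int), Dom_max_streak_count n chef_snaps chefina_snaps → Pre_max_streak_count n chef_snaps chefina_snaps → Spec_max_streak_count n chef_snaps chefina_snaps (max_streak_count n chef_snaps chefina_snaps)

-- ===== LEMMAS AND PROOFS =====

-- A's loop body on the precomputed boolean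
def stepB (st : Int × Int) (b : Bool) : Int × Int :=
  let s : Int := if b then st.1 + 1 else 0
  (s, max st.2 s)

lemma stepB_true (st : Int × Int) : stepB st true = (st.1 + 1, max st.2 (st.1 + 1)) := by
  simp [stepB]

lemma stepB_false (st : Int × Int) : stepB st false = (0, max st.2 0) := by
  simp [stepB]

-- characterisation of A's running maximum
def gAux : Int → List Bool → Int
  | s, [] => s
  | s, true :: tl => max (s + 1) (gAux (s + 1) tl)
  | _, false :: tl => max 0 (gAux 0 tl)

lemma gAux_nonneg : ∀ (bs : List Bool) (s : Int), 0 ≤ s → 0 ≤ gAux s bs := by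
  intro bs
  induction bs with
  | nil => intro s hs; simpa [gAux] using hs
  | cons b tl ih =>
    intro s hs
    cases b with
    | true => have := ih (s + 1) (by omega); simp only [gAux]; omega
    | false => have := ih 0 le_rfl; simp only [gAux]; omega

lemma foldB_eq : ∀ (bs : List Bool) (s m : Int), s ≤ m →
    (bs.foldl stepB (s, m)).2 = max m (gAux s bs) := by
  intro bs
  induction bs with
  | nil => intro s m h; simp [gAux]; omega
  | cons b tl ih =>
    intro s m h
    cases b with
    | true =>
      rw [List.foldl_cons, stepB_true]
      rw [ih (s + 1) (max m (s + 1)) (le_max_right _ _)]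
      simp only [gAux]
      omega
    | false =>
      rw [List.foldl_cons, stepB_false]
      rw [ih 0 (max m 0) (le_max_right _ _)]
      simp only [gAux]
      omega

-- the failure positions, the break list, and the gap list of B
def posS (xs : List Bool) (s : Int) : List Int :=
  ((PySem.List.enumerate xs s).filter (fun p => !p.2)).map (fun p => p.1)

def mkGaps : List Int → List Int
  | [] => []
  | [_] => []
  | x :: y :: t => (y - x - 1) :: mkGaps (y :: t)

def breaksF (bs : List Bool) : List Int := -1 :: (posS bs 0 ++ [(bs.length : Int)])

def gapsM (bs : List Bool) : List Int := mkGaps (breaksF bs)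

lemma posS_cons (x : Bool) (xs : List Bool) (s : Int) :
    posS (x :: xs) s = (if x then [] else [s]) ++ posS xs (s + 1) := by
  cases x <;> simp [posS, PySem.List.enumerate_cons]

lemma posS_shift1 : ∀ (xs : List Bool) (s : Int), posS xs (s + 1) = (posS xs s).map (· + 1) := by
  intro xs
  induction xs with
  | nil => intro s; simp [posS, PySem.List.enumerate_nil]
  | cons x tl ih =>
    intro s
    rw [posS_cons, posS_cons, ih (s + 1), List.map_append]
    cases x <;> simp

lemma zip_tail_eq_mkGaps : ∀ l : List Int,
    (l.zip l.tail).map (fun p => p.2 - p.1 - 1) = mkGaps l := by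
  intro l
  induction l with
  | nil => simp [mkGaps]
  | cons x t ih =>
    cases t with
    | nil => simp [mkGaps]
    | cons y t' =>
      simp only [List.tail_cons, List.zip_cons_cons, List.map_cons, mkGaps]
      rw [← ih]
      simp

lemma mkGaps_map_add (c : Int) : ∀ l : List Int, mkGaps (l.map (· + c)) = mkGaps l := by
  intro l
  induction l with
  | nil => simp [mkGaps]
  | cons x t ih =>
    cases t with
    | nil => simp [mkGaps]
    | cons y t' =>
      simp only [List.map_cons, mkGaps]
      rw [show (y + c - (x + c) - 1 : Int) = y - x - 1 by ring]
      have h' := ih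
      simp only [List.map_cons] at h'
      rw [h']

lemma gapsM_nil : gapsM [] = [0] := by decide

lemma breaksF_true (tl : List Bool) :
    breaksF (true :: tl) = -1 :: (posS tl 0 ++ [(tl.length : Int)]).map (· + 1) := by
  have hp : posS (true :: tl) 0 = (posS tl 0).map (· + 1) := by
    rw [posS_cons, posS_shift1]; simp
  rw [breaksF, hp]
  simp only [List.map_append, List.map_cons, List.map_nil, List.length_cons]
  push_cast
  simp

lemma breaksF_false (tl : List Bool) :
    breaksF (false :: tl) = -1 :: (breaksF tl).map (· + 1) := by
  have hp : posS (false :: tl) 0 = 0 :: (posS tl 0).map (· + 1) := by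
    rw [posS_cons, posS_shift1]; simp
  rw [breaksF, hp, breaksF]
  simp only [List.map_cons, List.map_append, List.map_nil, List.length_cons, List.cons_append]
  push_cast
  norm_num

lemma gapsM_true (tl : List Bool) (h : Int) (t : List Int) (hM : gapsM tl = h :: t) :
    gapsM (true :: tl) = (h + 1) :: t := by
  obtain ⟨y, ys, hys⟩ := List.exists_cons_of_ne_nil
    (show posS tl 0 ++ [(tl.length : Int)] ≠ [] by simp)
  have hMtl : gapsM tl = (y - (-1) - 1) :: mkGaps (y :: ys) := by
    rw [gapsM, breaksF, hys]; simp only [mkGaps]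
  rw [hM] at hMtl
  injection hMtl with hh ht
  have h1 : gapsM (true :: tl) = ((y + 1) - (-1) - 1) :: mkGaps ((y :: ys).map (· + 1)) := by
    rw [gapsM, breaksF_true, hys]
    simp only [List.map_cons, mkGaps]
  rw [h1, mkGaps_map_add, ← ht]
  congr 1
  omega

lemma gapsM_false (tl : List Bool) : gapsM (false :: tl) = 0 :: gapsM tl := by
  obtain ⟨y, ys, hys⟩ := List.exists_cons_of_ne_nil
    (show posS tl 0 ++ [(tl.length : Int)] ≠ [] by simp)
  have hb : breaksF tl = -1 :: y :: ys := by rw [breaksF, hys]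
  have h2 : ((-1 + 1 : Int)) :: (y :: ys).map (· + 1) = ((-1 : Int) :: y :: ys).map (· + 1) := by
    simp
  calc gapsM (false :: tl)
      = mkGaps (-1 :: (-1 + 1) :: (y :: ys).map (· + 1)) := by
        rw [gapsM, breaksF_false, hb]; simp
    _ = ((-1 + 1) - (-1) - 1) :: mkGaps ((-1 + 1) :: (y :: ys).map (· + 1)) := by
        simp only [mkGaps]
    _ = 0 :: mkGaps (((-1 : Int) :: y :: ys).map (· + 1)) := by rw [h2]; norm_num
    _ = 0 :: mkGaps (-1 :: y :: ys) := by rw [mkGaps_map_add]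
    _ = 0 :: gapsM tl := by rw [gapsM, hb]

lemma gapsM_shape : ∀ bs : List Bool, ∃ h t, gapsM bs = h :: t ∧ 0 ≤ h := by
  intro bs
  induction bs with
  | nil => exact ⟨0, [], gapsM_nil, le_rfl⟩
  | cons b tl ih =>
    obtain ⟨h, t, hM, hh⟩ := ih
    cases b with
    | true => exact ⟨h + 1, t, gapsM_true tl h t hM, by omega⟩
    | false => exact ⟨0, gapsM tl, gapsM_false tl, le_rfl⟩

lemma gaps_fold_eq : ∀ (bs : List Bool) (s m h : Int) (t : List Int), 0 ≤ s → s ≤ m →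
    gapsM bs = h :: t → t.foldl max (max m (s + h)) = max m (gAux s bs) := by
  intro bs
  induction bs with
  | nil =>
    intro s m h t hs hsm hM
    rw [gapsM_nil] at hM
    injection hM with hh ht
    subst ht
    simp only [List.foldl_nil, gAux, ← hh]
    omega
  | cons b tl ih =>
    intro s m h t hs hsm hM
    obtain ⟨h', t', hM', hh'⟩ := gapsM_shape tl
    cases b with
    | true =>
      rw [gapsM_true tl h' t' hM'] at hM
      injection hM with hh ht
      subst ht
      have hbase : max m (s + h) = max (max m (s + 1)) ((s + 1) + h') := by omega
      rw [hbase, ih (s + 1) (max m (s + 1)) h' t' (by omega) (le_max_right _ _) hM']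
      simp only [gAux]
      omega
    | false =>
      rw [gapsM_false tl] at hM
      injection hM with hh ht
      subst ht
      rw [hM']
      have hg := gAux_nonneg tl 0 le_rfl
      simp only [List.foldl_cons]
      have hbase : max (max m (s + h)) h' = max (max m 0) (0 + h') := by omega
      rw [hbase, ih 0 (max m 0) h' t' le_rfl (le_max_right _ _) hM']
      simp only [gAux]
      omega

-- ===== VERDICT (by name: the statement is the Claim_ definition above) =====
theorem max_streak_count_spec : Claim_equal_max_streak_count := by
  intro n chef_snaps chefina_snaps _ _
  unfold Spec_max_streak_count max_streak_count
  simp only [max_streak_count_alt]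
  have hfun : (fun (st : Int × Int) i =>
      let streak : Int :=
        if PySem.List.pyGetD chef_snaps i 0 > 0 ∧ PySem.List.pyGetD chefina_snaps i 0 > 0
        then st.1 + 1 else 0
      (streak, max st.2 streak)) =
      (fun (st : Int × Int) i =>
        stepB st (decide (PySem.List.pyGetD chef_snaps i 0 > 0 ∧
          PySem.List.pyGetD chefina_snaps i 0 > 0))) := by
    funext st i
    by_cases hc : PySem.List.pyGetD chef_snaps i 0 > 0 ∧ PySem.List.pyGetD chefina_snaps i 0 > 0 <;>
      simp [stepB, hc]
  rw [hfun, ← List.foldl_map]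
  generalize hok : (PySem.List.pyRange 0 n 1).map
    (fun i => decide (PySem.List.pyGetD chef_snaps i 0 > 0 ∧
      PySem.List.pyGetD chefina_snaps i 0 > 0)) = ok
  rw [foldB_eq ok 0 0 le_rfl]
  have hbreaks : [-1] ++ ((PySem.List.enumerate ok 0).filter (fun p => !p.2)).map (fun p => p.1)
      ++ [(ok.length : Int)] = breaksF ok := by
    simp [breaksF, posS]
  rw [hbreaks, PySem.List.slice_from_one, zip_tail_eq_mkGaps]
  obtain ⟨h, t, hM, hh⟩ := gapsM_shape ok
  rw [show mkGaps (breaksF ok) = gapsM ok from rfl, hM, PySem.List.max?_id_cons]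
  have hfold := gaps_fold_eq ok 0 0 h t le_rfl le_rfl hM
  rw [show max (0:Int) (0 + h) = h by omega] at hfold
  rw [hfold]
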